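-- pv_equiv track=rewrite | github.com/coolstick784/Aldi-Price-Data-With-Analysis | Dashboard Code/all_dashboard.py | product_matches_tokens
-- ===== SOURCE A (Python) =====
-- def product_matches_tokens(product_tokens: set[str], query_tokens: set[str]) -> bool:
--     """
--     Return True if every query token has at least one matching product token.
--
--     Matching rules:
--     - case-insensitive (handled by normalize_text_to_tokens)
--     - for short words (len <= 3): require exact match
--     - for longer words: allow partial match via prefix in either direction
--       e.g., 'fillet' matches 'fillets' and vice versa
--     """
--     if not query_tokens:
--         return False
--
--     for q in query_tokens:
--         found_for_q = False
--         for t in product_tokens: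
--             if len(q) <= 3:
--                 # short words: exact match only
--                 if t == q:
--                     found_for_q = True
--                     break
--             else:
--                 # longer words: prefix-based partial match
--                 if t.startswith(q) or q.startswith(t):
--                     found_for_q = True
--                     break
--
--         if not found_for_q:
--             return False
--
--     return True
-- ===== SOURCE B (Python) =====
-- def product_matches_tokens(product_tokens: set[str], query_tokens: set[str]) -> bool:
--     if not query_tokens:
--         return False
--     token_set = set(product_tokens)
--     prefix_set = set()
--     for t in product_tokens:
--         for i in range(len(t) + 1):
--             prefix_set.add(t[:i])
--     for q in query_tokens:
--         if len(q) <= 3: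
--             if q not in token_set:
--                 return False
--         elif q not in prefix_set and all(q[:i] not in token_set for i in range(len(q) + 1)):
--             return False
--     return True
-- ===== Notes on version B (the rewrite author's own statement) =====
-- stated objective: faster
-- what changed: replaces the nested scan of all product tokens per query token with two hash sets built once (the product tokens and all their prefixes), so each query token is answered by set lookups on its own prefixes instead of scanning every product token
import Mathlib
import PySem

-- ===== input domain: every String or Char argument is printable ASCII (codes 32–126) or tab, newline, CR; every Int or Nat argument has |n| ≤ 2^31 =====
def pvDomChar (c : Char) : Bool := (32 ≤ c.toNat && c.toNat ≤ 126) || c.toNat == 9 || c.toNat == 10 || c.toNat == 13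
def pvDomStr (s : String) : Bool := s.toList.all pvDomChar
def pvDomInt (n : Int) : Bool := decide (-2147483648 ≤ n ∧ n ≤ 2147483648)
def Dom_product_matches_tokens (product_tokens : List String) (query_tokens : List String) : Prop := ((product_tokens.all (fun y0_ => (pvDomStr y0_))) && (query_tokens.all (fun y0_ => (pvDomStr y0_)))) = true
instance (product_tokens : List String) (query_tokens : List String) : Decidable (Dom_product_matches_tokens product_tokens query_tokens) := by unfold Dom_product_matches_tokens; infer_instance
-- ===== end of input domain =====

-- B replaces A's nested per-query scan of all product tokens by two sets built once
-- (the tokens and all their prefixes), answering each query token by prefix lookups (objective: faster).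
-- The set arguments are Lists holding the distinct elements; the Boolean result is iteration-order independent.

-- ===== PORT A =====
-- inner 'for t in product_tokens' loop with break
def pvAInner (q : String) : List String → Bool
  | [] => false
  | t :: ts =>
    if PySem.Str.len q ≤ 3 then
      if t == q then true else pvAInner q ts
    else
      if PySem.Str.startswith t q || PySem.Str.startswith q t then true else pvAInner q ts

-- outer 'for q in query_tokens' loop with early 'return False'
def pvALoop (product_tokens : List String) : List String → Bool
  | [] => true
  | q :: qs => if pvAInner q product_tokens then pvALoop product_tokens qs else false

def product_matches_tokens (product_tokens : List String) (query_tokens : List String) : Bool :=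
  if query_tokens.isEmpty then false else pvALoop product_tokens query_tokens

-- ===== PORT B =====
-- 'for t in product_tokens: for i in range(len(t)+1): prefix_set.add(t[:i])'
def pvPrefixSet (product_tokens : List String) : PySem.Set String :=
  product_tokens.foldl
    (fun s t =>
      (PySem.List.pyRange 0 ((PySem.Str.len t : Int) + 1) 1).foldl
        (fun s i => PySem.Set.add s (PySem.Str.slice t none (some i))) s)
    PySem.Set.empty

-- 'for q in query_tokens' loop with early 'return False'
def pvBLoop (tokenSet prefixSet : PySem.Set String) : List String → Bool
  | [] => true
  | q :: qs =>
    if PySem.Str.len q ≤ 3 then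
      if !(PySem.Set.contains tokenSet q) then false else pvBLoop tokenSet prefixSet qs
    else
      if !(PySem.Set.contains prefixSet q) &&
         (PySem.List.pyRange 0 ((PySem.Str.len q : Int) + 1) 1).all
           (fun i => !(PySem.Set.contains tokenSet (PySem.Str.slice q none (some i))))
      then false else pvBLoop tokenSet prefixSet qs

def product_matches_tokens_alt (product_tokens : List String) (query_tokens : List String) : Bool :=
  if query_tokens.isEmpty then false
  else pvBLoop (PySem.Set.ofList product_tokens) (pvPrefixSet product_tokens) query_tokens

-- ===== PRECONDITION & SPEC =====
def Spec_product_matches_tokens (product_tokens : List String) (query_tokens : List String) (out : Bool) : Prop := out = product_matches_tokens_alt product_tokens query_tokens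
instance (product_tokens : List String) (query_tokens : List String) (out : Bool) : Decidable (Spec_product_matches_tokens product_tokens query_tokens out) := by unfold Spec_product_matches_tokens; infer_instance

-- ===== CLAIM (what is proved, stated in full; the proofs are below) =====
def Claim_equal_product_matches_tokens : Prop := ∀ (product_tokens : List String) (query_tokens : List String), Dom_product_matches_tokens product_tokens query_tokens → Spec_product_matches_tokens product_tokens query_tokens (product_matches_tokens product_tokens query_tokens)

-- ===== LEMMAS AND PROOFS =====

-- q is an initial slice t[:i] for some i in range(len(t)+1) iff q is a prefix of t
lemma pv_slice_char (t q : String) :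
    (∃ i ∈ PySem.List.pyRange 0 ((PySem.Str.len t : Int) + 1) 1,
        q = PySem.Str.slice t none (some i)) ↔ q.toList <+: t.toList := by
  constructor
  · rintro ⟨i, hi, rfl⟩
    rw [PySem.List.mem_pyRange_one] at hi
    obtain ⟨n, rfl⟩ := Int.eq_ofNat_of_zero_le hi.1
    simp [PySem.List.slice_to_natCast]
    exact List.take_prefix _ _
  · intro h
    refine ⟨(q.toList.length : Int), ?_, ?_⟩
    · rw [PySem.List.mem_pyRange_one]
      have hle := h.length_le
      have hlen : PySem.Str.len t = t.toList.length := by simp [PySem.Str.len]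
      rw [hlen]
      omega
    · rw [String.ext_iff]
      simp [PySem.List.slice_to_natCast]
      exact List.prefix_iff_eq_take.mp h

-- the inner prefix-collecting loop of pvPrefixSet, one token
lemma pv_mem_inner (s : PySem.Set String) (t q : String) :
    q ∈ (PySem.List.pyRange 0 ((PySem.Str.len t : Int) + 1) 1).foldl
          (fun s i => PySem.Set.add s (PySem.Str.slice t none (some i))) s
      ↔ q ∈ s ∨ q.toList <+: t.toList := by
  rw [PySem.Set.mem_foldl_add, pv_slice_char]

lemma pv_mem_outer (pts : List String) (s : PySem.Set String) (q : String) :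
    q ∈ pts.foldl
          (fun s t =>
            (PySem.List.pyRange 0 ((PySem.Str.len t : Int) + 1) 1).foldl
              (fun s i => PySem.Set.add s (PySem.Str.slice t none (some i))) s) s
      ↔ q ∈ s ∨ ∃ t ∈ pts, q.toList <+: t.toList := by
  induction pts generalizing s with
  | nil => simp
  | cons t ts ih =>
    rw [List.foldl_cons, ih, pv_mem_inner]
    simp only [List.mem_cons]
    constructor
    · rintro ((h | h) | ⟨u, hu, hp⟩)
      · exact Or.inl h
      · exact Or.inr ⟨t, Or.inl rfl, h⟩
      · exact Or.inr ⟨u, Or.inr hu, hp⟩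
    · rintro (h | ⟨u, (rfl | hu), hp⟩)
      · exact Or.inl (Or.inl h)
      · exact Or.inl (Or.inr hp)
      · exact Or.inr ⟨u, hu, hp⟩

lemma pv_mem_prefixSet (pts : List String) (q : String) :
    q ∈ pvPrefixSet pts ↔ ∃ t ∈ pts, q.toList <+: t.toList := by
  unfold pvPrefixSet
  rw [pv_mem_outer]
  simp [PySem.Set.empty]

-- the 'all(q[:i] not in token_set …)' test fails iff some product token is a prefix of q
lemma pv_any_own_prefix (pts : List String) (q : String) :
    ((PySem.List.pyRange 0 ((PySem.Str.len q : Int) + 1) 1).all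
        (fun i => !(PySem.Set.contains (PySem.Set.ofList pts) (PySem.Str.slice q none (some i)))) = false)
      ↔ ∃ t ∈ pts, t.toList <+: q.toList := by
  rw [List.all_eq_false]
  constructor
  · rintro ⟨i, hi, hc⟩
    simp only [Bool.not_eq_true', Bool.not_eq_false] at hc
    rw [PySem.Set.contains_iff, PySem.Set.mem_ofList] at hc
    exact ⟨PySem.Str.slice q none (some i), hc, (pv_slice_char q _).mp ⟨i, hi, rfl⟩⟩
  · rintro ⟨t, ht, hp⟩
    obtain ⟨i, hi, heq⟩ := (pv_slice_char q t).mpr hp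
    refine ⟨i, hi, ?_⟩
    simp only [Bool.not_eq_true', Bool.not_eq_false]
    rw [PySem.Set.contains_iff, PySem.Set.mem_ofList, ← heq]
    exact ht

-- A's inner scan, characterised
lemma pv_aInner_iff (pts : List String) (q : String) :
    pvAInner q pts = true ↔
      (if PySem.Str.len q ≤ 3 then q ∈ pts
       else (∃ t ∈ pts, q.toList <+: t.toList) ∨ (∃ t ∈ pts, t.toList <+: q.toList)) := by
  induction pts with
  | nil => split <;> simp [pvAInner]
  | cons t ts ih =>
    simp only [pvAInner]
    by_cases hlen : PySem.Str.len q ≤ 3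
    · rw [if_pos hlen] at ih ⊢
      rw [if_pos hlen]
      cases hq : t == q with
      | true =>
        have : t = q := by simpa using hq
        subst this
        simp
      | false =>
        have hne : ¬ q = t := fun h => by simp [h] at hq
        rw [if_neg Bool.false_ne_true, ih]
        constructor
        · exact fun h => List.mem_cons_of_mem _ h
        · intro h
          rcases List.mem_cons.mp h with h | h
          · exact absurd h hne
          · exact h
    · rw [if_neg hlen] at ih ⊢
      rw [if_neg hlen]
      cases h1 : PySem.Str.startswith t q with
      | true =>
        rw [PySem.Str.startswith_eq] at h1
        have hp := (PySem.Chars.startswith_iff _ _).mp h1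
        rw [Bool.true_or, if_pos rfl]
        simp only [true_iff]
        exact Or.inl ⟨t, List.mem_cons_self, hp⟩
      | false =>
        cases h2 : PySem.Str.startswith q t with
        | true =>
          rw [PySem.Str.startswith_eq] at h2
          have hp := (PySem.Chars.startswith_iff _ _).mp h2
          rw [Bool.false_or, if_pos rfl]
          simp only [true_iff]
          exact Or.inr ⟨t, List.mem_cons_self, hp⟩
        | false =>
          have h1' : ¬ q.toList <+: t.toList := fun h => by
            rw [← PySem.Chars.startswith_iff, ← PySem.Str.startswith_eq, h1] at h
            exact Bool.noConfusion h
          have h2' : ¬ t.toList <+: q.toList := fun h => by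
            rw [← PySem.Chars.startswith_iff, ← PySem.Str.startswith_eq, h2] at h
            exact Bool.noConfusion h
          rw [Bool.false_or, if_neg Bool.false_ne_true, ih]
          constructor
          · rintro (⟨u, hu, hp⟩ | ⟨u, hu, hp⟩)
            · exact Or.inl ⟨u, List.mem_cons_of_mem _ hu, hp⟩
            · exact Or.inr ⟨u, List.mem_cons_of_mem _ hu, hp⟩
          · rintro (⟨u, hu, hp⟩ | ⟨u, hu, hp⟩)
            · rcases List.mem_cons.mp hu with rfl | hu
              · exact absurd hp h1'
              · exact Or.inl ⟨u, hu, hp⟩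
            · rcases List.mem_cons.mp hu with rfl | hu
              · exact absurd hp h2'
              · exact Or.inr ⟨u, hu, hp⟩

lemma pv_loop_eq (pts : List String) (qts : List String) :
    pvALoop pts qts = pvBLoop (PySem.Set.ofList pts) (pvPrefixSet pts) qts := by
  induction qts with
  | nil => rfl
  | cons q qs ih =>
    simp only [pvALoop, pvBLoop]
    by_cases hlen : PySem.Str.len q ≤ 3
    · have hA : pvAInner q pts = PySem.Set.contains (PySem.Set.ofList pts) q := by
        rw [Bool.eq_iff_iff, pv_aInner_iff, if_pos hlen, PySem.Set.contains_iff,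
          PySem.Set.mem_ofList]
      rw [hA, if_pos hlen]
      cases hc : PySem.Set.contains (PySem.Set.ofList pts) q with
      | true =>
        rw [Bool.not_true, if_pos rfl, if_neg Bool.false_ne_true]
        exact ih
      | false =>
        rw [Bool.not_false, if_neg Bool.false_ne_true, if_pos rfl]
    · have hA : pvAInner q pts = true ↔
          (∃ t ∈ pts, q.toList <+: t.toList) ∨ (∃ t ∈ pts, t.toList <+: q.toList) := by
        rw [pv_aInner_iff, if_neg hlen]
      rw [if_neg hlen]
      cases hp : PySem.Set.contains (pvPrefixSet pts) q with
      | true =>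
        have hAt : pvAInner q pts = true :=
          hA.mpr (Or.inl ((pv_mem_prefixSet pts q).mp ((PySem.Set.contains_iff _ _).mp hp)))
        rw [hAt, Bool.not_true, Bool.false_and, if_pos rfl, if_neg Bool.false_ne_true]
        exact ih
      | false =>
        rw [Bool.not_false, Bool.true_and]
        cases ha : (PySem.List.pyRange 0 ((PySem.Str.len q : Int) + 1) 1).all
            (fun i => !(PySem.Set.contains (PySem.Set.ofList pts)
               (PySem.Str.slice q none (some i)))) with
        | true =>
          have hAf : pvAInner q pts = false := by
            rw [Bool.eq_false_iff, Ne, hA, not_or]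
            refine ⟨fun h => ?_, fun h => ?_⟩
            · have hc := (PySem.Set.contains_iff _ _).mpr ((pv_mem_prefixSet pts q).mpr h)
              rw [hp] at hc
              exact Bool.noConfusion hc
            · have hf := (pv_any_own_prefix pts q).mpr h
              rw [ha] at hf
              exact Bool.noConfusion hf
          rw [hAf, if_neg Bool.false_ne_true, if_pos rfl]
        | false =>
          have hAt : pvAInner q pts = true :=
            hA.mpr (Or.inr ((pv_any_own_prefix pts q).mp ha))
          rw [hAt, if_pos rfl, if_neg Bool.false_ne_true]
          exact ih

-- ===== VERDICT (by name: the statement is the Claim_ definition above) =====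
theorem product_matches_tokens_spec : Claim_equal_product_matches_tokens := by
  intro pts qts _
  unfold Spec_product_matches_tokens product_matches_tokens product_matches_tokens_alt
  by_cases h : qts.isEmpty <;> simp [h, pv_loop_eq]
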